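-- pv_equiv track=rewrite | github.com/avivavraham/tec_project_1 | apply/314649286_208295691_assignment1/kmeans.py | find_closest_cluster
-- ===== SOURCE A (Python) =====
-- def find_closest_cluster(data_point, mu_array):
--     difference_array = [sum([(a - b)**2 for a, b in zip(data_point, mu_array[i])]) for i in range(len(mu_array))]
--     min_sum = difference_array[0]
--     index = 0
--     for i in range(len(difference_array)):
--         if difference_array[i] < min_sum:
--             min_sum = difference_array[i]
--             index = i
--     return index
-- ===== SOURCE B (Python) =====
-- def find_closest_cluster(data_point, mu_array):
--     def sq_dist(centroid):
--         s = 0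
--         for a, b in zip(data_point, centroid):
--             s += (a - b) ** 2
--         return s
--     order = sorted(range(len(mu_array)), key=lambda i: sq_dist(mu_array[i]))
--     return order[0]
-- ===== Notes on version B (the rewrite author's own statement) =====
-- stated objective: alternative
-- what changed: B replaces A's build-distance-list-then-scan-for-minimum with a stable sort of the centroid indices by squared distance, returning the first index of the sorted order (stability makes it the earliest minimum, matching A's strict-< tie rule).
import Mathlib
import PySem

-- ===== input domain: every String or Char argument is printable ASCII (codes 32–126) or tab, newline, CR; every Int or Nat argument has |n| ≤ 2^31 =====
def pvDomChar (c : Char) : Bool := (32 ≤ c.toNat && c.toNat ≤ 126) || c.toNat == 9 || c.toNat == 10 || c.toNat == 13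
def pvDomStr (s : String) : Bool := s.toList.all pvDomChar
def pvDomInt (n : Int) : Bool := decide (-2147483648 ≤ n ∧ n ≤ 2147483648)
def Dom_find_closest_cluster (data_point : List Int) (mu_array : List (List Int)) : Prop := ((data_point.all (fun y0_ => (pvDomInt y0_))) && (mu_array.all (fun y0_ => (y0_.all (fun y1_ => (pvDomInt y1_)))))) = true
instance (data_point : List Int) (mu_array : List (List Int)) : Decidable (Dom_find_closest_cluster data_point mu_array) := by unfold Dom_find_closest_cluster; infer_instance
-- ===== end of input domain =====

-- B returns the head of a stable sort of the centroid indices by squared distance instead of A's distance-list-then-scan; alternative decomposition, same result.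


-- ===== PORT A =====
-- sum([(a - b)**2 for a, b in zip(data_point, c)]) : build the list, then sum it
def pvSqA (dp c : List Int) : Int := ((List.zip dp c).map (fun ab => (ab.1 - ab.2) ^ 2)).sum

def find_closest_cluster (data_point : List Int) (mu_array : List (List Int)) : Int :=
  let diff := (PySem.List.pyRange 0 (mu_array.length : Int) 1).map
    (fun i => pvSqA data_point (PySem.List.pyGetD mu_array i []))
  -- difference_array[0] raises IndexError on empty mu_array; Pre_ excludes that input
  let st := (PySem.List.pyRange 0 (diff.length : Int) 1).foldl
    (fun (st : Int × Int) i =>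
      if PySem.List.pyGetD diff i 0 < st.1 then (PySem.List.pyGetD diff i 0, i) else st)
    (PySem.List.pyGetD diff 0 0, 0)
  st.2

-- ===== PORT B =====
-- sq_dist: explicit running-accumulator loop over zip(data_point, centroid)
def pvSqB (dp c : List Int) : Int := (List.zip dp c).foldl (fun s ab => s + (ab.1 - ab.2) ^ 2) 0

def find_closest_cluster_alt (data_point : List Int) (mu_array : List (List Int)) : Int :=
  -- sorted(range(len(mu_array)), key=lambda i: sq_dist(mu_array[i]))
  let order := PySem.List.sorted (PySem.List.pyRange 0 (mu_array.length : Int) 1)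
      (fun i => pvSqB data_point (PySem.List.pyGetD mu_array i []))
  -- order[0] raises IndexError on empty mu_array; Pre_ excludes that input
  PySem.List.pyGetD order 0 0

-- ===== PRECONDITION & SPEC =====
-- Pre_ excludes only empty mu_array, on which A raises IndexError (difference_array[0]); B's order[0] raises there too.
def Pre_find_closest_cluster (data_point : List Int) (mu_array : List (List Int)) : Prop := mu_array ≠ []
instance (data_point : List Int) (mu_array : List (List Int)) : Decidable (Pre_find_closest_cluster data_point mu_array) := by unfold Pre_find_closest_cluster; infer_instance
def pvWitness_find_closest_cluster : List Int × List (List Int) := ([1, 2], [[0, 0], [1, 3]])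

def Spec_find_closest_cluster (data_point : List Int) (mu_array : List (List Int)) (out : Int) : Prop := out = find_closest_cluster_alt data_point mu_array
instance (data_point : List Int) (mu_array : List (List Int)) (out : Int) : Decidable (Spec_find_closest_cluster data_point mu_array out) := by unfold Spec_find_closest_cluster; infer_instance

-- ===== CLAIM (what is proved, stated in full; the proofs are below) =====
def Claim_equal_find_closest_cluster : Prop := ∀ (data_point : List Int) (mu_array : List (List Int)), Dom_find_closest_cluster data_point mu_array → Pre_find_closest_cluster data_point mu_array → Spec_find_closest_cluster data_point mu_array (find_closest_cluster data_point mu_array)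

-- ===== LEMMAS AND PROOFS =====

-- foldl with a running sum, shifted start
theorem pv_foldl_shift (l : List (Int × Int)) (v : Int) :
    l.foldl (fun s ab => s + (ab.1 - ab.2) ^ 2) v
      = v + l.foldl (fun s ab => s + (ab.1 - ab.2) ^ 2) 0 := by
  induction l generalizing v with
  | nil => simp
  | cons y ys ih =>
    simp only [List.foldl_cons]
    rw [ih, ih ((0:Int) + (y.1 - y.2) ^ 2)]
    ring

-- the two ways of summing the squared differences agree
theorem pvSq_eq (dp c : List Int) : pvSqA dp c = pvSqB dp c := by
  unfold pvSqA pvSqB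
  generalize List.zip dp c = l
  induction l with
  | nil => simp
  | cons x xs ih =>
    simp only [List.map_cons, List.sum_cons, List.foldl_cons]
    rw [pv_foldl_shift, ← ih]
    ring

-- head of one stable insertion: x goes to the front exactly when its key is strictly smaller
theorem pv_head_insertBy (key : Int → Int) (x y : Int) (ys : List Int) :
    (PySem.List.insertBy (fun a b => decide (key a < key b)) x (y :: ys)).head?
      = some (if key x < key y then x else y) := by
  simp only [PySem.List.insertBy]
  by_cases hc : key x < key y
  · simp [hc]
  · simp [hc]

-- head of the whole insertion-sort fold is the running strict-< argmin
theorem pv_head_foldl_insertBy (key : Int → Int) (l : List Int) (acc : List Int) (m : Int)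
    (h : acc.head? = some m) :
    (l.foldl (fun acc x => PySem.List.insertBy (fun a b => decide (key a < key b)) x acc) acc).head?
      = some (l.foldl (fun m x => if key x < key m then x else m) m) := by
  induction l generalizing acc m with
  | nil => simpa using h
  | cons x xs ih =>
    cases acc with
    | nil => simp at h
    | cons y ys =>
      simp only [List.head?_cons, Option.some.injEq] at h
      subst h
      simp only [List.foldl_cons]
      exact ih _ _ (pv_head_insertBy key x y ys)

-- snd of A's (min_sum, index) fold is the running strict-< argmin on indices
theorem pv_snd_fold_argmin (f : Int → Int) (l : List Int) (a : Int) :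
    (l.foldl (fun (st : Int × Int) i => if f i < st.1 then (f i, i) else st) (f a, a)).2
      = l.foldl (fun m i => if f i < f m then i else m) a := by
  induction l generalizing a with
  | nil => rfl
  | cons x xs ih =>
    simp only [List.foldl_cons]
    by_cases hc : f x < f a
    · simp only [hc, if_pos]
      exact ih x
    · simp only [hc, if_neg, not_false_iff]
      exact ih a

-- ===== VERDICT (by name: the statement is the Claim_ definition above) =====
theorem find_closest_cluster_spec : Claim_equal_find_closest_cluster := by
  intro dp mu _ hne
  unfold Spec_find_closest_cluster find_closest_cluster find_closest_cluster_alt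
  simp only []
  have hn : (0 : Int) < (mu.length : Int) := by
    have : mu.length ≠ 0 := by simpa [List.length_eq_zero_iff] using hne
    omega
  set f : Int → Int := fun i => pvSqA dp (PySem.List.pyGetD mu i []) with hf
  have hkey : (fun i => pvSqB dp (PySem.List.pyGetD mu i [])) = f := by
    funext i; rw [hf]; exact (pvSq_eq dp _).symm
  have hlen : (((PySem.List.pyRange 0 (mu.length : Int) 1).map f).length : Int) = (mu.length : Int) := by
    simp [PySem.List.length_pyRange_one]
  set diff := (PySem.List.pyRange 0 (mu.length : Int) 1).map f with hdiff
  have hd0 : PySem.List.pyGetD diff 0 0 = f 0 :=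
    PySem.List.pyGetD_map_pyRange_of_nonneg f (mu.length : Int) 0 0 le_rfl hn
  have hdi : ∀ i : Int, 0 ≤ i → i < (mu.length : Int) → PySem.List.pyGetD diff i 0 = f i :=
    fun i h1 h2 => PySem.List.pyGetD_map_pyRange_of_nonneg f _ i 0 h1 h2
  -- A's side: rewrite the loop to fold over the range with key f, then take its argmin form
  rw [hlen]
  have hA : ((PySem.List.pyRange 0 (mu.length : Int) 1).foldl
      (fun (st : Int × Int) i =>
        if PySem.List.pyGetD diff i 0 < st.1 then (PySem.List.pyGetD diff i 0, i) else st)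
      (PySem.List.pyGetD diff 0 0, 0)).2
      = (PySem.List.pyRange 0 (mu.length : Int) 1).foldl (fun m i => if f i < f m then i else m) 0 := by
    rw [hd0]
    have hcong := PySem.List.foldl_congr_mem (PySem.List.pyRange 0 (mu.length : Int) 1)
      (fun (st : Int × Int) i =>
        if PySem.List.pyGetD diff i 0 < st.1 then (PySem.List.pyGetD diff i 0, i) else st)
      (fun (st : Int × Int) i => if f i < st.1 then (f i, i) else st)
      ((f 0, (0 : Int)))
      (by
        intro acc x hx
        have hx' := (PySem.List.mem_pyRange_one).1 hx
        simp only [hdi x (by omega) hx'.2])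
    rw [hcong]
    exact pv_snd_fold_argmin f _ 0
  rw [hA]
  -- B's side: the sorted order's head is the same running argmin
  rw [hkey, PySem.List.sorted_eq_foldl_insertBy]
  rw [PySem.List.pyRange_one_cons hn]
  simp only [List.foldl_cons]
  rw [if_neg (lt_irrefl (f 0))]
  have hhead := pv_head_foldl_insertBy f (PySem.List.pyRange (0 + 1) (mu.length : Int) 1)
    (PySem.List.insertBy (fun a b => decide (f a < f b)) 0 []) 0 (by
      simp [PySem.List.insertBy])
  -- extract the head from pyGetD _ 0 0
  generalize hgen : (PySem.List.pyRange (0 + 1) (mu.length : Int) 1).foldl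
      (fun acc x => PySem.List.insertBy (fun a b => decide (f a < f b)) x acc)
      (PySem.List.insertBy (fun a b => decide (f a < f b)) 0 []) = ord at hhead ⊢
  cases ord with
  | nil => simp at hhead
  | cons h t =>
    simp only [List.head?_cons, Option.some.injEq] at hhead
    rw [PySem.List.pyGetD_zero_cons, hhead]
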